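-- pv_equiv track=rewrite | github.com/bystrovmaxim/aoa | scripts/check_package_boundaries.py | _owner_for_file
-- ===== SOURCE A (Python) =====
-- def _owner_for_file(rel_posix: str, roots: dict[str, list[str]]) -> str | None:
--     best: str | None = None
--     best_len = -1
--     for pkg, rlist in roots.items():
--         for root in rlist:
--             if rel_posix == root or rel_posix.startswith(root + "/"):
--                 ln = len(root)
--                 if ln > best_len:
--                     best_len = ln
--                     best = pkg
--     return best
-- ===== SOURCE B (Python) =====
-- def _owner_for_file(rel_posix: str, roots: dict[str, list[str]]) -> str | None:
--     # Reverse index: root string -> owning package (first package wins on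
--     # duplicate roots, like A's strict '>' update), then probe the '/'-boundary
--     # prefixes of rel_posix from longest to shortest.
--     owner: dict[str, str] = {}
--     for pkg, rlist in roots.items():
--         for root in rlist:
--             owner.setdefault(root, pkg)
--     pkg = owner.get(rel_posix)
--     if pkg is not None:
--         return pkg
--     for i in range(len(rel_posix) - 1, -1, -1):
--         if rel_posix[i] == "/":
--             pkg = owner.get(rel_posix[:i])
--             if pkg is not None:
--                 return pkg
--     return None
-- ===== Notes on version B (the rewrite author's own statement) =====
-- stated objective: alternative
-- what changed: Instead of scanning every (package, root) pair while tracking the max matching root length, B builds a reverse dict root->package once (setdefault, first package wins) and then probes rel_posix's '/'-boundary prefixes from longest to shortest with dict lookups.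
import Mathlib
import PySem

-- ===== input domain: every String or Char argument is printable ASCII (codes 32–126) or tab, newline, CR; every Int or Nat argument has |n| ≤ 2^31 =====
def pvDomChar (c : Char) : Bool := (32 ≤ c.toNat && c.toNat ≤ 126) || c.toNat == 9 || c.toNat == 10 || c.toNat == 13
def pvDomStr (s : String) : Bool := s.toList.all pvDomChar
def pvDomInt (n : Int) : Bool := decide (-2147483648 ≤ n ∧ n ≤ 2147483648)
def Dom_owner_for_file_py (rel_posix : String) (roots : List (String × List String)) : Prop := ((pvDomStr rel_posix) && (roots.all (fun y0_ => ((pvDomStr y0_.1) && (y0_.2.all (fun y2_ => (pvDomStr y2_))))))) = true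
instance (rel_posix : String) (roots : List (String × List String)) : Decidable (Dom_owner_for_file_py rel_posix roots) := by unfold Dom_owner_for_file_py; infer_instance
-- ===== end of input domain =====

-- B replaces A's scan over all (package, root) pairs (tracking the maximal matching
-- root length) by a reverse index root → package built once with setdefault, probed at
-- the '/'-boundary prefixes of rel_posix from longest to shortest (objective: alternative).

-- ===== PORT A =====
def owner_for_file_py (rel_posix : String) (roots : List (String × List String)) : Option String :=
  (roots.foldl
    (fun st pr => pr.2.foldl
      (fun st root =>
        if rel_posix == root
            || PySem.Str.startswith rel_posix (String.ofList (root.toList ++ ['/'])) then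
          if ((PySem.Str.len root : Int) > st.2) then (some pr.1, (PySem.Str.len root : Int)) else st
        else st)
      st)
    ((none : Option String), (-1 : Int))).1

-- ===== PORT B =====
def owner_for_file_py_alt (rel_posix : String) (roots : List (String × List String)) : Option String :=
  let owner : PySem.Dict String String :=
    roots.foldl (fun d pr => pr.2.foldl (fun d root => d.setdefault root pr.1) d) PySem.Dict.empty
  match owner.get? rel_posix with
  | some pkg => some pkg
  | none =>
    (PySem.List.pyRange ((PySem.Str.len rel_posix : Int) - 1) (-1) (-1)).findSome? (fun i =>
      if PySem.Str.pyGet? rel_posix i == some '/' then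
        owner.get? (PySem.Str.slice rel_posix none (some i))
      else none)

-- ===== PRECONDITION & SPEC =====
def Spec_owner_for_file_py (rel_posix : String) (roots : List (String × List String)) (out : Option String) : Prop := out = owner_for_file_py_alt rel_posix roots
instance (rel_posix : String) (roots : List (String × List String)) (out : Option String) : Decidable (Spec_owner_for_file_py rel_posix roots out) := by unfold Spec_owner_for_file_py; infer_instance

-- ===== CLAIM (what is proved, stated in full; the proofs are below) =====
def Claim_equal_owner_for_file_py : Prop := ∀ (rel_posix : String) (roots : List (String × List String)), Dom_owner_for_file_py rel_posix roots → Spec_owner_for_file_py rel_posix roots (owner_for_file_py rel_posix roots)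

-- ===== LEMMAS AND PROOFS =====

-- A root rs matches path cs  (Python: rel == root or rel.startswith(root + "/"))
def pvMatch (cs rs : List Char) : Bool := cs == rs || PySem.Chars.startswith cs (rs ++ ['/'])

-- A's (and B's build loop's) iteration order over (package, root) pairs, flattened
def pvFlat (roots : List (String × List String)) : List (String × String) :=
  roots.flatMap (fun pr => pr.2.map (fun r => (pr.1, r)))

-- A's loop body on the flattened pair list
def pvStep (cs : List Char) (st : Option String × Int) (p : String × String) : Option String × Int :=
  if pvMatch cs p.2.toList then
    if ((p.2.toList.length : Int) > st.2) then (some p.1, (p.2.toList.length : Int)) else st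
  else st

-- package of the first pair whose root is c (what B's dict lookup returns)
def pvF (roots : List (String × List String)) (c : String) : Option String :=
  ((pvFlat roots).find? (fun p => p.2 == c)).map (·.1)

-- maximal matching root length over the pairs (base -1, as in A)
def pvN (cs : List Char) (roots : List (String × List String)) : Int :=
  (((pvFlat roots).filter (fun p => pvMatch cs p.2.toList)).map
    (fun p => (p.2.toList.length : Int))).foldl max (-1)

theorem pv_beq_str (s t : String) : (s == t) = (s.toList == t.toList) := by
  rw [Bool.eq_iff_iff]
  simp [String.toList_inj]

theorem pv_A_eq_fold (rel : String) (roots : List (String × List String)) :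
    owner_for_file_py rel roots =
      ((pvFlat roots).foldl (pvStep rel.toList) ((none : Option String), (-1 : Int))).1 := by
  unfold owner_for_file_py pvFlat
  rw [List.foldl_flatMap]
  have hfun : (fun (st : Option String × Int) (pr : String × List String) => pr.2.foldl
      (fun st root =>
        if rel == root
            || PySem.Str.startswith rel (String.ofList (root.toList ++ ['/'])) then
          if ((PySem.Str.len root : Int) > st.2) then (some pr.1, (PySem.Str.len root : Int)) else st
        else st)
      st) =
      (fun st pr => (pr.2.map (fun r => (pr.1, r))).foldl (pvStep rel.toList) st) := by
    funext st pr
    rw [List.foldl_map]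
    apply PySem.List.foldl_congr_mem
    intro acc root _
    simp only [pvStep, pvMatch, PySem.Str.startswith_eq, String.toList_ofList,
      PySem.Str.len_eq, pv_beq_str]
  rw [hfun]

theorem pv_fold_char (cs : List Char) (l : List (String × String)) (b : Option String) (bl : Int) :
    l.foldl (pvStep cs) (b, bl) =
      (if bl < ((l.filter (fun p => pvMatch cs p.2.toList)).map (fun p => (p.2.toList.length : Int))).foldl max bl then
         (l.find? (fun p => pvMatch cs p.2.toList &&
            ((p.2.toList.length : Int) == ((l.filter (fun p => pvMatch cs p.2.toList)).map (fun p => (p.2.toList.length : Int))).foldl max bl))).map (·.1)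
       else b,
       ((l.filter (fun p => pvMatch cs p.2.toList)).map (fun p => (p.2.toList.length : Int))).foldl max bl) := by
  induction l generalizing b bl with
  | nil => simp
  | cons p t ih =>
    by_cases hm : pvMatch cs p.2.toList
    · have hNpos : (((p :: t).filter (fun q => pvMatch cs q.2.toList)).map (fun q => (q.2.toList.length : Int))).foldl max bl
          = ((t.filter (fun q => pvMatch cs q.2.toList)).map (fun q => (q.2.toList.length : Int))).foldl max (max bl (p.2.toList.length : Int)) := by
        simp [hm]
      by_cases hgt : ((p.2.toList.length : Int) > bl)
      · have hbase : max bl (p.2.toList.length : Int) = (p.2.toList.length : Int) := by omega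
        rw [List.foldl_cons,
          show pvStep cs (b, bl) p = (some p.1, (p.2.toList.length : Int)) from by
            unfold pvStep; rw [if_pos hm, if_pos hgt],
          ih]
        simp only [hNpos, hbase]
        have hle : (p.2.toList.length : Int) ≤
            ((t.filter (fun q => pvMatch cs q.2.toList)).map (fun q => (q.2.toList.length : Int))).foldl max (p.2.toList.length : Int) :=
          (PySem.List.le_foldl_max _ _).1
        by_cases hq : ((p.2.toList.length : Int) <
            ((t.filter (fun q => pvMatch cs q.2.toList)).map (fun q => (q.2.toList.length : Int))).foldl max (p.2.toList.length : Int))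
        · rw [if_pos hq,
            if_pos (show bl < ((t.filter (fun q => pvMatch cs q.2.toList)).map (fun q => (q.2.toList.length : Int))).foldl max (p.2.toList.length : Int) from by omega),
            List.find?_cons_of_neg]
          simp only [hm, Bool.true_and, beq_iff_eq]
          omega
        · have heq : ((t.filter (fun q => pvMatch cs q.2.toList)).map (fun q => (q.2.toList.length : Int))).foldl max (p.2.toList.length : Int) = (p.2.toList.length : Int) := by omega
          rw [if_neg hq, heq, if_pos hgt, List.find?_cons_of_pos (by simp [hm])]
          simp
      · have hbase : max bl (p.2.toList.length : Int) = bl := by omega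
        rw [List.foldl_cons,
          show pvStep cs (b, bl) p = (b, bl) from by
            unfold pvStep; rw [if_pos hm, if_neg hgt],
          ih]
        simp only [hNpos, hbase]
        by_cases hlt : (bl <
            ((t.filter (fun q => pvMatch cs q.2.toList)).map (fun q => (q.2.toList.length : Int))).foldl max bl)
        · rw [if_pos hlt, if_pos hlt, List.find?_cons_of_neg]
          simp only [hm, Bool.true_and, beq_iff_eq]
          omega
        · rw [if_neg hlt, if_neg hlt]
    · rw [List.foldl_cons,
        show pvStep cs (b, bl) p = (b, bl) from by unfold pvStep; rw [if_neg hm],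
        ih]
      simp only [List.filter_cons, List.find?_cons, hm, Bool.false_eq_true, if_false,
        Bool.false_and]

theorem pv_dict_get (l : List (String × String)) (d : PySem.Dict String String) (c : String) :
    (l.foldl (fun d p => d.setdefault p.2 p.1) d).get? c =
      (d.get? c).or ((l.find? (fun p => p.2 == c)).map (·.1)) := by
  induction l generalizing d with
  | nil => simp
  | cons p t ih =>
    rw [List.foldl_cons, ih]
    by_cases hc : p.2 = c
    · subst hc
      rw [PySem.Dict.get?_setdefault_self, List.find?_cons_of_pos (by simp)]
      cases d.get? p.2 <;> simp
    · rw [PySem.Dict.get?_setdefault_of_ne (k' := c) (k := p.2) (v := p.1) d (Ne.symm hc),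
        List.find?_cons_of_neg (by simp [hc])]

theorem pv_B_char (rel : String) (roots : List (String × List String)) :
    owner_for_file_py_alt rel roots =
      match pvF roots rel with
      | some v => some v
      | none =>
        (List.range rel.toList.length).reverse.findSome? (fun i =>
          if rel.toList[i]? = some '/' then pvF roots (String.ofList (rel.toList.take i)) else none) := by
  unfold owner_for_file_py_alt
  have hdict : roots.foldl (fun d pr => pr.2.foldl (fun d root => d.setdefault root pr.1) d)
      PySem.Dict.empty = (pvFlat roots).foldl (fun d p => d.setdefault p.2 p.1) PySem.Dict.empty := by
    unfold pvFlat
    rw [List.foldl_flatMap]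
    congr 1
    funext d pr
    rw [List.foldl_map]
  have hget : ∀ c, ((pvFlat roots).foldl (fun d p => d.setdefault p.2 p.1)
      PySem.Dict.empty).get? c = pvF roots c := by
    intro c
    rw [pv_dict_get]
    simp [pvF]
  simp only [hdict, hget]
  have hrange : PySem.List.pyRange ((PySem.Str.len rel : Int) - 1) (-1) (-1)
      = (List.range rel.toList.length).reverse.map (fun k : Nat => (k : Int)) := by
    rw [PySem.List.pyRange_neg_one_eq_reverse,
      show (-1 : Int) + 1 = 0 from by norm_num,
      show ((PySem.Str.len rel : Int) - 1) + 1 = (rel.toList.length : Int) from by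
        simp [PySem.Str.len_eq],
      PySem.List.pyRange_one, ← List.map_reverse]
    simp
  rw [hrange, List.findSome?_map]
  have hbody : ((fun i => if PySem.Str.pyGet? rel i == some '/' then
        pvF roots (PySem.Str.slice rel none (some i)) else none) ∘ (fun k : Nat => (k : Int)))
      = (fun i : Nat => if rel.toList[i]? = some '/' then
        pvF roots (String.ofList (rel.toList.take i)) else none) := by
    funext k
    have hslice : PySem.Str.slice rel none (some (k : Int)) = String.ofList (rel.toList.take k) := by
      rw [← String.toList_inj, String.toList_ofList, PySem.Str.toList_slice,
        PySem.Chars.slice_eq_listSlice, PySem.List.slice_to_natCast]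
    simp [Function.comp, hslice, beq_iff_eq]
  rw [hbody]

-- rs ++ [c] is a prefix of cs iff rs is and cs carries c right after it
theorem pv_append_one_prefix (rs cs : List Char) (c : Char) :
    rs ++ [c] <+: cs ↔ rs <+: cs ∧ cs[rs.length]? = some c := by
  constructor
  · rintro ⟨t, rfl⟩
    refine ⟨⟨[c] ++ t, by simp⟩, ?_⟩
    simp
  · rintro ⟨⟨t, rfl⟩, h⟩
    rw [List.getElem?_append_right (by omega)] at h
    simp only [Nat.sub_self] at h
    obtain ⟨t', rfl⟩ : ∃ t', t = c :: t' := by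
      cases t with
      | nil => simp at h
      | cons x t' => simp at h; exact ⟨t', by rw [h]⟩
    exact ⟨t', by simp⟩

theorem pv_match_iff (cs rs : List Char) :
    pvMatch cs rs = true ↔ rs = cs ∨ (rs <+: cs ∧ cs[rs.length]? = some '/') := by
  unfold pvMatch
  rw [Bool.or_eq_true, beq_iff_eq, PySem.Chars.startswith_iff, pv_append_one_prefix]
  constructor
  · rintro (h | h)
    · exact Or.inl h.symm
    · exact Or.inr h
  · rintro (h | h)
    · exact Or.inl h.symm
    · exact Or.inr h

theorem pv_match_prefix {cs rs : List Char} (h : pvMatch cs rs = true) : rs <+: cs := by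
  rcases (pv_match_iff cs rs).mp h with h | h
  · exact h ▸ List.prefix_refl cs
  · exact h.1

theorem pv_match_unique {cs rs₁ rs₂ : List Char} (h₁ : pvMatch cs rs₁ = true)
    (h₂ : pvMatch cs rs₂ = true) (hl : rs₁.length = rs₂.length) : rs₁ = rs₂ := by
  rw [List.prefix_iff_eq_take.mp (pv_match_prefix h₁),
      List.prefix_iff_eq_take.mp (pv_match_prefix h₂), hl]

theorem pv_findSome_range_reverse {α : Type} (h : Nat → Option α) (n k : Nat) (hk : k < n)
    (hsome : h k ≠ none) (habove : ∀ i, k < i → i < n → h i = none) :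
    (List.range n).reverse.findSome? h = h k := by
  induction n with
  | zero => omega
  | succ m ih =>
    rw [List.range_succ]
    simp only [List.reverse_append, List.reverse_singleton, List.singleton_append,
      List.findSome?_cons]
    by_cases hm : k = m
    · subst hm
      cases hv : h k with
      | none => exact absurd hv hsome
      | some v => rfl
    · rw [habove m (by omega) (by omega)]
      show (List.range m).reverse.findSome? h = h k
      exact ih (by omega) (fun i h1 h2 => habove i h1 (by omega))

theorem pv_F_ne_none_iff (roots : List (String × List String)) (c : String) :
    pvF roots c ≠ none ↔ ∃ p ∈ pvFlat roots, p.2 = c := by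
  unfold pvF
  rw [Ne, Option.map_eq_none_iff, List.find?_eq_none]
  push Not
  simp

-- every matching pair's root length is bounded by pvN
theorem pv_le_N (rel : String) (roots : List (String × List String)) {p : String × String}
    (hp : p ∈ pvFlat roots) (hmatch : pvMatch rel.toList p.2.toList = true) :
    (p.2.toList.length : Int) ≤ pvN rel.toList roots := by
  exact (PySem.List.le_foldl_max _ _).2 _
    (List.mem_map_of_mem (List.mem_filter.mpr ⟨hp, hmatch⟩))

-- if some pair matches, pvN is attained by a matching pair
theorem pv_N_attained (rel : String) (roots : List (String × List String))
    (hN : (-1 : Int) < pvN rel.toList roots) :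
    ∃ p ∈ pvFlat roots, pvMatch rel.toList p.2.toList = true ∧
      (p.2.toList.length : Int) = pvN rel.toList roots := by
  rcases PySem.List.foldl_max_mem
      (((pvFlat roots).filter (fun p => pvMatch rel.toList p.2.toList)).map
        (fun p => (p.2.toList.length : Int))) (-1) with h | h
  · exfalso
    unfold pvN at hN
    omega
  · rcases List.mem_map.mp h with ⟨q, hq, hqlen⟩
    rcases List.mem_filter.mp hq with ⟨hqmem, hqmatch⟩
    exact ⟨q, hqmem, hqmatch, hqlen⟩

-- ===== VERDICT (by name: the statement is the Claim_ definition above) =====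
theorem owner_for_file_py_spec : Claim_equal_owner_for_file_py := by
  intro rel roots _
  unfold Spec_owner_for_file_py
  rw [pv_A_eq_fold, pv_fold_char, pv_B_char]
  show (if (-1 : Int) < pvN rel.toList roots then
      ((pvFlat roots).find? (fun p => pvMatch rel.toList p.2.toList &&
        ((p.2.toList.length : Int) == pvN rel.toList roots))).map (·.1)
    else none) = _
  by_cases hN : (-1 : Int) < pvN rel.toList roots
  · -- some pair matches; c is the (unique) longest matching root
    rcases pv_N_attained rel roots hN with ⟨q, hqmem, hqmatch, hqlen⟩
    rw [if_pos hN]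
    -- the find? predicate of A coincides with "root = q.2"
    have hpred : (fun p : String × String => pvMatch rel.toList p.2.toList &&
        ((p.2.toList.length : Int) == pvN rel.toList roots)) = (fun p => p.2 == q.2) := by
      funext p
      rw [Bool.eq_iff_iff]
      simp only [Bool.and_eq_true, beq_iff_eq]
      constructor
      · rintro ⟨hm, hl⟩
        exact String.toList_inj.mp (pv_match_unique hm hqmatch (by omega))
      · intro hpq
        rw [hpq]
        exact ⟨hqmatch, hqlen⟩
    have hA : ((pvFlat roots).find? (fun p => pvMatch rel.toList p.2.toList &&
        ((p.2.toList.length : Int) == pvN rel.toList roots))).map (·.1) = pvF roots q.2 := by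
      rw [hpred]; rfl
    rw [hA]
    have hFq : pvF roots q.2 ≠ none := (pv_F_ne_none_iff roots q.2).mpr ⟨q, hqmem, rfl⟩
    by_cases hc : q.2.toList = rel.toList
    · -- the longest matching root is rel_posix itself: B's first lookup hits
      rw [show q.2 = rel from String.toList_inj.mp hc] at hFq ⊢
      cases hv : pvF roots rel with
      | none => exact absurd hv hFq
      | some v => simp
    · -- proper prefix: B's descending scan first hits index q.2.toList.length
      rcases (pv_match_iff rel.toList q.2.toList).mp hqmatch with h | ⟨hpre, hsl⟩
      · exact absurd h hc
      have hi0 : q.2.toList.length < rel.toList.length := by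
        rcases List.getElem?_eq_some_iff.mp hsl with ⟨h, -⟩
        exact h
      have hFrel : pvF roots rel = none := by
        by_contra h
        rcases (pv_F_ne_none_iff roots rel).mp h with ⟨p, hpmem, hp2⟩
        have hm : pvMatch rel.toList p.2.toList = true := by
          rw [hp2]; simp [pvMatch]
        have := pv_le_N rel roots hpmem hm
        rw [hp2] at this
        omega
      rw [hFrel]
      rw [pv_findSome_range_reverse _ rel.toList.length q.2.toList.length hi0]
      · rw [if_pos hsl, ← List.prefix_iff_eq_take.mp hpre, String.ofList_toList]
      · rw [if_pos hsl, ← List.prefix_iff_eq_take.mp hpre, String.ofList_toList]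
        exact hFq
      · intro i hgt hlt
        by_cases hslash : rel.toList[i]? = some '/'
        · rw [if_pos hslash]
          by_contra h
          rcases (pv_F_ne_none_iff roots _).mp h with ⟨p, hpmem, hp2⟩
          have hplist : p.2.toList = rel.toList.take i := by
            rw [hp2, String.toList_ofList]
          have hm : pvMatch rel.toList p.2.toList = true := by
            rw [pv_match_iff, hplist]
            exact Or.inr ⟨List.take_prefix i rel.toList,
              by rw [List.length_take_of_le (le_of_lt hlt)]; exact hslash⟩
          have := pv_le_N rel roots hpmem hm
          rw [hplist, List.length_take_of_le (le_of_lt hlt)] at this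
          omega
        · rw [if_neg hslash]
  · -- nothing matches: both sides return none
    rw [if_neg hN]
    have hnomatch : ∀ p ∈ pvFlat roots, ¬ pvMatch rel.toList p.2.toList = true := by
      intro p hp hm
      have := pv_le_N rel roots hp hm
      have : (0 : Int) ≤ (p.2.toList.length : Int) := by positivity
      omega
    have hFrel : pvF roots rel = none := by
      by_contra h
      rcases (pv_F_ne_none_iff roots rel).mp h with ⟨p, hpmem, hp2⟩
      exact hnomatch p hpmem (by rw [hp2]; simp [pvMatch])
    rw [hFrel]
    rw [List.findSome?_eq_none_iff.mpr]
    intro i hi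
    by_cases hslash : rel.toList[i]? = some '/'
    · rw [if_pos hslash]
      by_contra h
      rcases (pv_F_ne_none_iff roots _).mp h with ⟨p, hpmem, hp2⟩
      have hilt : i < rel.toList.length := List.mem_range.mp (List.mem_reverse.mp hi)
      refine hnomatch p hpmem ?_
      rw [pv_match_iff, hp2, String.toList_ofList]
      exact Or.inr ⟨List.take_prefix i rel.toList,
        by rw [List.length_take_of_le (le_of_lt hilt)]; exact hslash⟩
    · rw [if_neg hslash]
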